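-- pv_equiv track=rewrite | github.com/justjacobrosario/BS_Computer_Science_UPD_Repo | 1st Year 1st Sem/python test drive/lec19_algorithms/scratch.py | equal_parity_counter
-- ===== SOURCE A (Python) =====
-- def equal_parity_counter(seq):
--     lista = {0:1}
--     prefix = 0
--     evens = 0
--     odds = 0
--     count = 0
--
--     for item in seq:
--         if item % 2 == 0:
--             evens += 1
--         else:
--             odds += 1
--
--         prefix = (evens - odds)
--
--         count += lista.get(prefix, 0)
--
--         lista[prefix] = lista.get(prefix, 0) + 1
--
--         yield count
-- ===== SOURCE B (Python) =====
-- def equal_parity_counter(seq):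
--     # Recompute each yield from scratch: sort the prefix balances, group equal
--     # runs, and sum the handshake formula C(run, 2) over the runs.
--     balances = [0]
--     bal = 0
--     for x in seq:
--         bal += 1 - 2 * (x % 2)
--         balances.append(bal)
--         srt = sorted(balances)
--         prev = srt[0]
--         total = 0
--         run = 1
--         for b in srt[1:]:
--             if b == prev:
--                 run += 1
--             else:
--                 total += run * (run - 1) // 2
--                 run = 1
--             prev = b
--         total += run * (run - 1) // 2
--         yield total
-- ===== Notes on version B (the rewrite author's own statement) =====
-- stated objective: alternative
-- what changed: Replaces A's single-pass streaming accumulator over a balance-frequency dict by recomputing every yield from scratch: sort the current prefix-balance list, scan its equal runs, and sum the handshake formula run*(run-1)//2 over the runs.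
import Mathlib
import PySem

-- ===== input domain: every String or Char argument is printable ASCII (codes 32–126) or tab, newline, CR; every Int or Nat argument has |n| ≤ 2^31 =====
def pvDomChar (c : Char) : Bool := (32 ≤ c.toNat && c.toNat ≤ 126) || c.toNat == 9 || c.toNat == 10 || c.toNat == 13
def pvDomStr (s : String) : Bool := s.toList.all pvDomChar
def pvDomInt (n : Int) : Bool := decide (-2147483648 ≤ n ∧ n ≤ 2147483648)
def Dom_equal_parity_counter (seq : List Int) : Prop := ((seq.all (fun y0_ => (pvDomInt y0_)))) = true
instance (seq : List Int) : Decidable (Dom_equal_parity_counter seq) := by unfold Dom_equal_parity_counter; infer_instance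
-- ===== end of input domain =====

-- B drops A's streaming frequency-dict accumulator and instead recomputes each yield
-- from scratch: sort the prefix-balance list and sum the handshake formula C(run,2)
-- over its equal runs (alternative algorithm, not faster).

-- ===== PORT A =====
-- state: (lista, evens, odds, count, yielded outputs)
def pvStepA (st : PySem.Dict Int Int × Int × Int × Int × List Int) (item : Int) :
    PySem.Dict Int Int × Int × Int × Int × List Int :=
  match st with
  | (lista, evens, odds, count, out) =>
    let evens := if PySem.Int.mod item 2 = 0 then evens + 1 else evens
    let odds := if PySem.Int.mod item 2 = 0 then odds else odds + 1
    let prefix_ := evens - odds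
    let count := count + lista.getD prefix_ 0
    let lista := lista.insert prefix_ (lista.getD prefix_ 0 + 1)
    (lista, evens, odds, count, out ++ [count])

def equal_parity_counter (seq : List Int) : List Int :=
  (seq.foldl pvStepA ((PySem.Dict.empty.insert (0 : Int) (1 : Int)), 0, 0, 0, [])).2.2.2.2

-- ===== PORT B =====
-- run * (run - 1) // 2
def pvC2 (n : Int) : Int := PySem.Int.floordiv (n * (n - 1)) 2

-- the body of the inner 'for b in srt[1:]' loop; state (prev, total, run)
def pvRunStep (st : Int × Int × Int) (b : Int) : Int × Int × Int :=
  match st with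
  | (prev, total, run) =>
    if b = prev then (b, total, run + 1) else (b, total + pvC2 run, 1)

-- sum of C(run,2) over the equal runs of srt; srt[0] ported with default 0
-- (every call site passes a nonempty list: balances is seeded with [0])
def pvRunTotal (srt : List Int) : Int :=
  let st := (PySem.List.slice srt (some 1) none).foldl pvRunStep (PySem.List.pyGetD srt 0 0, 0, 1)
  st.2.1 + pvC2 st.2.2

-- state: (bal, balances, yielded outputs)
def pvStepB (st : Int × List Int × List Int) (x : Int) : Int × List Int × List Int :=
  match st with
  | (bal, balances, out) =>
    let bal := bal + (1 - 2 * PySem.Int.mod x 2)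
    let balances := balances ++ [bal]
    let srt := PySem.List.sorted balances (fun v => v) false
    (bal, balances, out ++ [pvRunTotal srt])

def equal_parity_counter_alt (seq : List Int) : List Int :=
  (seq.foldl pvStepB (0, [0], [])).2.2

-- ===== PRECONDITION & SPEC =====
def Spec_equal_parity_counter (seq : List Int) (out : List Int) : Prop := out = equal_parity_counter_alt seq
instance (seq : List Int) (out : List Int) : Decidable (Spec_equal_parity_counter seq out) := by unfold Spec_equal_parity_counter; infer_instance

-- ===== CLAIM (what is proved, stated in full; the proofs are below) =====
def Claim_equal_equal_parity_counter : Prop := ∀ (seq : List Int), Dom_equal_parity_counter seq → Spec_equal_parity_counter seq (equal_parity_counter seq)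

-- ===== LEMMAS AND PROOFS =====

-- the common value: sum over the distinct elements of xs of C(multiplicity, 2)
def pvE (xs : List Int) : Int :=
  ((PySem.List.dedup xs).map (fun v => pvC2 (xs.count v : Int))).sum

lemma pvC2_succ (c : Int) : pvC2 (c + 1) = pvC2 c + c := by
  show PySem.Int.floordiv ((c + 1) * (c + 1 - 1)) 2 = PySem.Int.floordiv (c * (c - 1)) 2 + c
  have h : (c + 1) * (c + 1 - 1) = c * (c - 1) + c * 2 := by ring
  rw [h]
  exact Int.add_mul_fdiv_right _ _ (by norm_num)

lemma pv_dedup_append (xs : List Int) (x : Int) :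
    PySem.List.dedup (xs ++ [x]) =
      if x ∈ xs then PySem.List.dedup xs else PySem.List.dedup xs ++ [x] := by
  simp only [PySem.List.dedup_eq_ofList, PySem.Set.ofList_eq_foldl, List.foldl_append,
    List.foldl_cons, List.foldl_nil]
  show PySem.Set.add _ x = _
  by_cases hx : x ∈ xs
  · rw [if_pos hx]
    have : x ∈ xs.foldl PySem.Set.add [] := by
      rw [← PySem.Set.ofList_eq_foldl]; simpa [PySem.Set.mem_ofList] using hx
    simp [PySem.Set.add, this]
  · rw [if_neg hx]
    have : x ∉ xs.foldl PySem.Set.add [] := by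
      rw [← PySem.Set.ofList_eq_foldl]; simpa [PySem.Set.mem_ofList] using hx
    simp [PySem.Set.add, this]

-- sum over a nodup list when f and g agree except possibly at one member x
lemma pv_sum_shift (l : List Int) (x : Int) (f g : Int → Int) :
    l.Nodup → x ∈ l → (∀ v ∈ l, v ≠ x → f v = g v) →
    (l.map f).sum = (l.map g).sum + (f x - g x) := by
  induction l with
  | nil => intro _ hx; cases hx
  | cons a t ih =>
    intro hnd hx hfg
    rcases List.mem_cons.mp hx with rfl | hxt
    · have hfgt : ∀ v ∈ t, f v = g v := by
        intro v hv
        exact hfg v (List.mem_cons_of_mem _ hv) (fun hva => (List.nodup_cons.mp hnd).1 (hva ▸ hv))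
      simp only [List.map_cons, List.sum_cons, List.map_congr_left hfgt]
      ring
    · have hax : a ≠ x := fun h => (List.nodup_cons.mp hnd).1 (h ▸ hxt)
      have := ih (List.nodup_cons.mp hnd).2 hxt (fun v hv => hfg v (List.mem_cons_of_mem _ hv))
      simp only [List.map_cons, List.sum_cons, this, hfg a (List.mem_cons_self) hax]
      ring

lemma pvE_append (xs : List Int) (x : Int) :
    pvE (xs ++ [x]) = pvE xs + (xs.count x : Int) := by
  unfold pvE
  rw [pv_dedup_append]
  by_cases hx : x ∈ xs
  · rw [if_pos hx]
    have h := pv_sum_shift (PySem.List.dedup xs) x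
      (fun v => pvC2 (((xs ++ [x]).count v : Nat) : Int))
      (fun v => pvC2 ((xs.count v : Nat) : Int))
      (PySem.List.nodup_dedup xs) ((PySem.List.mem_dedup _ _).mpr hx)
      (by
        intro v _ hvx
        have : (xs ++ [x]).count v = xs.count v := by
          simp [List.count_append, Ne.symm hvx]
        simp only [this])
    rw [h]
    simp only []
    have hc : (xs ++ [x]).count x = xs.count x + 1 := by
      simp [List.count_append]
    simp only [hc]
    push_cast
    rw [pvC2_succ]
    ring
  · rw [if_neg hx]
    have hcongr : ∀ v ∈ PySem.List.dedup xs,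
        pvC2 (((xs ++ [x]).count v : Nat) : Int) = pvC2 ((xs.count v : Nat) : Int) := by
      intro v hv
      have hvx : v ≠ x := fun h => hx (h ▸ (PySem.List.mem_dedup _ _).mp hv)
      have : (xs ++ [x]).count v = xs.count v := by
        simp [List.count_append, Ne.symm hvx]
      simp only [this]
    have hcx : xs.count x = 0 := List.count_eq_zero.mpr hx
    simp only [List.map_append, List.sum_append, List.map_cons, List.map_nil,
      List.map_congr_left hcongr, List.sum_cons, List.sum_nil]
    have : (xs ++ [x]).count x = 1 := by simp [List.count_append, hcx]
    simp only [this, hcx]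
    have h1 : pvC2 ((1 : Nat) : Int) = 0 := by decide
    have h0 : ((0 : Nat) : Int) = 0 := by norm_num
    rw [h1, h0]
    ring

lemma pvE_perm (xs ys : List Int) (h : List.Perm xs ys) : pvE xs = pvE ys := by
  unfold pvE
  have hd : List.Perm (PySem.List.dedup xs) (PySem.List.dedup ys) := by
    rw [List.perm_ext_iff_of_nodup (PySem.List.nodup_dedup xs) (PySem.List.nodup_dedup ys)]
    intro a
    rw [PySem.List.mem_dedup, PySem.List.mem_dedup]
    exact h.mem_iff
  have hc : ∀ v, xs.count v = ys.count v := fun v => h.count_eq v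
  calc ((PySem.List.dedup xs).map (fun v => pvC2 ((xs.count v : Nat) : Int))).sum
      = ((PySem.List.dedup xs).map (fun v => pvC2 ((ys.count v : Nat) : Int))).sum := by
        simp only [hc]
    _ = ((PySem.List.dedup ys).map (fun v => pvC2 ((ys.count v : Nat) : Int))).sum :=
        (hd.map _).sum_eq

lemma pv_add_mem (s : List Int) (x : Int) (hx : x ∈ s) : PySem.Set.add s x = s := by
  simp [PySem.Set.add, PySem.Set.contains, hx]

lemma pv_add_notmem (s : List Int) (x : Int) (hx : x ∉ s) : PySem.Set.add s x = s ++ [x] := by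
  simp [PySem.Set.add, PySem.Set.contains, hx]

lemma pv_add_cons (s : List Int) (x y : Int) (h : y ≠ x) :
    PySem.Set.add (x :: s) y = x :: PySem.Set.add s y := by
  simp only [PySem.Set.add, PySem.Set.contains, List.contains_cons]
  have : (y == x) = false := by simpa using h
  rw [this]
  simp only [Bool.false_or]
  split_ifs <;> rfl

lemma pv_foldl_add_notmem (ys : List Int) :
    ∀ (s : List Int) (x : Int), x ∉ ys →
      ys.foldl PySem.Set.add (x :: s) = x :: ys.foldl PySem.Set.add s := by
  induction ys with
  | nil => intro s x _; rfl
  | cons y t ih =>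
    intro s x hx
    simp only [List.foldl_cons]
    rw [pv_add_cons s x y (fun h => hx (h ▸ List.mem_cons_self))]
    exact ih _ _ (fun h => hx (List.mem_cons_of_mem _ h))

lemma pv_foldl_add_replicate (n : Nat) (x : Int) (s : List Int) (hx : x ∈ s) :
    (List.replicate n x).foldl PySem.Set.add s = s := by
  induction n with
  | zero => rfl
  | succ m ih =>
    simp only [List.replicate_succ, List.foldl_cons, pv_add_mem s x hx, ih]

lemma pv_dedup_replicate_append (n : Nat) (x : Int) (ys : List Int) (hn : 1 ≤ n) (hx : x ∉ ys) :
    PySem.List.dedup (List.replicate n x ++ ys) = x :: PySem.List.dedup ys := by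
  obtain ⟨m, rfl⟩ : ∃ m, n = m + 1 := ⟨n - 1, by omega⟩
  simp only [PySem.List.dedup_eq_ofList, PySem.Set.ofList_eq_foldl, List.foldl_append]
  have h1 : (List.replicate (m + 1) x).foldl PySem.Set.add [] = [x] := by
    simp only [List.replicate_succ, List.foldl_cons]
    rw [pv_add_notmem [] x (by simp)]
    exact pv_foldl_add_replicate m x [x] (by simp)
  rw [h1]
  exact pv_foldl_add_notmem ys [] x hx

lemma pvE_replicate_append (n : Nat) (x : Int) (ys : List Int) (hn : 1 ≤ n) (hx : x ∉ ys) :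
    pvE (List.replicate n x ++ ys) = pvC2 (n : Int) + pvE ys := by
  unfold pvE
  rw [pv_dedup_replicate_append n x ys hn hx]
  have hcx : (List.replicate n x ++ ys).count x = n := by
    simp [List.count_append, List.count_eq_zero.mpr hx]
  have hcongr : ∀ v ∈ PySem.List.dedup ys,
      pvC2 (((List.replicate n x ++ ys).count v : Nat) : Int) = pvC2 ((ys.count v : Nat) : Int) := by
    intro v hv
    have hvx : v ≠ x := fun h => hx (h ▸ (PySem.List.mem_dedup _ _).mp hv)
    have : (List.replicate n x ++ ys).count v = ys.count v := by
      simp [List.count_append, List.count_replicate, Ne.symm hvx]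
    simp only [this]
  simp only [List.map_cons, List.sum_cons, List.map_congr_left hcongr, hcx]

lemma pv_scan_inv (rest : List Int) :
    ∀ (prev total run : Int), 1 ≤ run →
    List.Pairwise (· ≤ ·) (prev :: rest) →
    (rest.foldl pvRunStep (prev, total, run)).2.1 + pvC2 (rest.foldl pvRunStep (prev, total, run)).2.2
      = total + pvE (List.replicate run.toNat prev ++ rest) := by
  induction rest with
  | nil =>
    intro prev total run hrun _
    simp only [List.foldl_nil, List.append_nil]
    have hrep := pvE_replicate_append run.toNat prev [] (by omega) (by simp)
    rw [List.append_nil] at hrep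
    rw [hrep]
    have : ((run.toNat : Nat) : Int) = run := Int.toNat_of_nonneg (by omega)
    rw [this]
    show total + pvC2 run = total + (pvC2 run + pvE [])
    have : pvE [] = 0 := rfl
    rw [this]; ring
  | cons b rs ih =>
    intro prev total run hrun hpw
    have hpw' : List.Pairwise (· ≤ ·) (b :: rs) := hpw.tail
    have hle : prev ≤ b := (List.pairwise_cons.mp hpw).1 b List.mem_cons_self
    simp only [List.foldl_cons]
    by_cases hb : b = prev
    · rw [pvRunStep, if_pos hb]
      rw [ih b total (run + 1) (by omega) hpw']
      have ht : (run + 1).toNat = run.toNat + 1 := by omega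
      rw [ht, List.replicate_succ']
      subst hb
      simp only [List.append_assoc, List.singleton_append]
    · rw [pvRunStep, if_neg hb]
      rw [ih b (total + pvC2 run) 1 (by norm_num) hpw']
      have h1 : (1 : Int).toNat = 1 := rfl
      rw [h1]
      have hnm : prev ∉ b :: rs := by
        intro hmem
        have hlt : prev < b := lt_of_le_of_ne hle (fun h => hb h.symm)
        rcases List.mem_cons.mp hmem with h | h
        · exact absurd h (ne_of_lt hlt)
        · have : b ≤ prev := (List.pairwise_cons.mp hpw').1 prev h
          omega
      rw [pvE_replicate_append run.toNat prev (b :: rs) (by omega) hnm]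
      have : ((run.toNat : Nat) : Int) = run := Int.toNat_of_nonneg (by omega)
      rw [this]
      have : List.replicate 1 b ++ rs = b :: rs := by simp
      rw [this]
      ring

lemma pv_runTotal_sorted (xs : List Int) (hne : xs ≠ []) :
    pvRunTotal (PySem.List.sorted xs (fun v => v) false) = pvE xs := by
  have hp := PySem.List.sorted_perm xs (fun v => v) false
  have hpe : pvE (PySem.List.sorted xs (fun v => v) false) = pvE xs := pvE_perm _ _ hp
  have hpw := PySem.List.sorted_pairwise xs (fun v => v)
  rcases hsrt : PySem.List.sorted xs (fun v => v) false with _ | ⟨s, t⟩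
  · rw [hsrt] at hp
    exact absurd hp.symm.eq_nil hne
  · rw [hsrt] at hpe hpw
    unfold pvRunTotal
    rw [PySem.List.slice_from_one]
    have hget : PySem.List.pyGetD (s :: t) (0 : Int) 0 = s := by
      simp [PySem.List.pyGetD, PySem.List.pyGet?, PySem.List.pyIdx?]
    rw [hget]
    show (t.foldl pvRunStep (s, 0, 1)).2.1 + pvC2 (t.foldl pvRunStep (s, 0, 1)).2.2 = pvE xs
    rw [pv_scan_inv t s 0 1 (by norm_num) hpw]
    have : List.replicate (1 : Int).toNat s ++ t = s :: t := by simp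
    rw [this, hpe]
    ring

lemma pv_mod_two (x : Int) : PySem.Int.mod x 2 = 0 ∨ PySem.Int.mod x 2 = 1 := by
  have h1 := PySem.Int.mod_nonneg x (b := 2) (by norm_num)
  have h2 := PySem.Int.mod_lt x (b := 2) (by norm_num)
  omega

lemma pv_loop_eq (seq : List Int) :
    ∀ (lista : PySem.Dict Int Int) (evens odds count : Int) (out balances : List Int),
    (∀ k : Int, lista.getD k 0 = (balances.count k : Int)) →
    count = pvE balances →
    balances ≠ [] →
    (seq.foldl pvStepA (lista, evens, odds, count, out)).2.2.2.2 =
    (seq.foldl pvStepB (evens - odds, balances, out)).2.2 := by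
  induction seq with
  | nil => intro _ _ _ _ _ _ _ _ _; rfl
  | cons x rs ih =>
    intro lista evens odds count out balances hinv hcount hne
    simp only [List.foldl_cons]
    rcases pv_mod_two x with hm | hm
    · -- even item: the new balance is evens + 1 - odds
      simp only [pvStepA, pvStepB, hm]
      norm_num
      have hb : evens - odds + 1 = evens + 1 - odds := by ring
      rw [hb]
      have hout : pvRunTotal (PySem.List.sorted (balances ++ [evens + 1 - odds]) (fun v => v))
          = count + lista.getD (evens + 1 - odds) 0 := by
        rw [pv_runTotal_sorted _ (by simp), pvE_append, hcount, hinv]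
      rw [hout]
      apply ih
      · intro k
        rw [PySem.Dict.getD_insert]
        by_cases hk : k = evens + 1 - odds
        · simp [hk, hinv, List.count_append]
        · simp [hk, hinv, List.count_append, Ne.symm hk]
      · rw [pvE_append, hcount, hinv]
      · simp
    · -- odd item: the new balance is evens - (odds + 1)
      simp only [pvStepA, pvStepB, hm]
      norm_num
      have hb : evens - odds + -1 = evens - (odds + 1) := by ring
      rw [hb]
      have hout : pvRunTotal (PySem.List.sorted (balances ++ [evens - (odds + 1)]) (fun v => v))
          = count + lista.getD (evens - (odds + 1)) 0 := by
        rw [pv_runTotal_sorted _ (by simp), pvE_append, hcount, hinv]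
      rw [hout]
      apply ih
      · intro k
        rw [PySem.Dict.getD_insert]
        by_cases hk : k = evens - (odds + 1)
        · simp [hk, hinv, List.count_append]
        · simp [hk, hinv, List.count_append, Ne.symm hk]
      · rw [pvE_append, hcount, hinv]
      · simp


-- ===== VERDICT (by name: the statement is the Claim_ definition above) =====
theorem equal_parity_counter_spec : Claim_equal_equal_parity_counter := by
  intro seq _
  unfold Spec_equal_parity_counter equal_parity_counter equal_parity_counter_alt
  have := pv_loop_eq seq ((PySem.Dict.empty.insert (0 : Int) (1 : Int))) 0 0 0 [] [0]
    (by
      intro k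
      by_cases hk : k = 0
      · simp [hk]
      · simp [PySem.Dict.getD_insert, hk, Ne.symm hk])
    (by decide)
    (by simp)
  simpa using this
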